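-- pv_equiv track=rewrite | github.com/rookinc/xalchemy_lab2 | witness_machine/g15_transport_solver.py | _distance_overlap_values
-- ===== SOURCE A (Python) =====
-- def _row_overlap(a: list[int], b: list[int]) -> int:
--     return sum(x * y for x, y in zip(a, b))
--
-- def _distance_overlap_values(M: list[list[int]], D: list[list[int]]) -> dict[str, list[int]]:
--     buckets: dict[str, list[int]] = {"0": [], "1": [], "2": [], "3": []}
--     n = len(M)
--     for i in range(n):
--         for j in range(n):
--             d = D[i][j]
--             if d in {0, 1, 2, 3}:
--                 buckets[str(d)].append(_row_overlap(M[i], M[j]))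
--     return {k: sorted(set(v)) for k, v in buckets.items()}
-- ===== SOURCE B (Python) =====
-- def _distance_overlap_values(M, D):
--     n = len(M)
--     buckets = {}
--     for d in (0, 1, 2, 3):
--         pairs = [(i, j) for i in range(n) for j in range(n) if D[i][j] == d]
--         buckets[str(d)] = sorted({sum(x * y for x, y in zip(M[i], M[j])) for i, j in pairs})
--     return buckets
-- ===== Notes on version B (the rewrite author's own statement) =====
-- stated objective: alternative
-- what changed: B runs one indexing pass per distance d in (0,1,2,3) that first collects the matching (i,j) pairs from D, then computes their row dot products into a set and sorts it, instead of A's single double loop that appends overlaps into a pre-seeded dict of buckets and post-processes every bucket.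
import Mathlib
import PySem

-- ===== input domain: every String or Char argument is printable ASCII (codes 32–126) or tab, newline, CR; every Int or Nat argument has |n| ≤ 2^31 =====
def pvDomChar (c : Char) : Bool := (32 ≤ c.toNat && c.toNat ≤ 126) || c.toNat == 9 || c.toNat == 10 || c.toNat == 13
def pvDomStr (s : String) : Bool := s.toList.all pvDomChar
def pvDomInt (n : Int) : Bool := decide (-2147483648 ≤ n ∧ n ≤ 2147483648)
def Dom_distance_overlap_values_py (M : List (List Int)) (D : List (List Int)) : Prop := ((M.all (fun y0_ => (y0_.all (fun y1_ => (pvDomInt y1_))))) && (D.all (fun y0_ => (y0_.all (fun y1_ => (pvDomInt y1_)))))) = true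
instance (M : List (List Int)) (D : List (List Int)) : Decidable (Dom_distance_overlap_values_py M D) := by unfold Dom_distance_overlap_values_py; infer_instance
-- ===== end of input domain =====

-- B makes one indexing pass per distance collecting the matching (i,j) pairs, then computes their dot products; alternative decomposition, same cost.


-- ===== PORT A =====
-- _row_overlap: sum(x * y for x, y in zip(a, b))
def pvRowOverlap (a b : List Int) : Int :=
  (List.zip a b).foldl (fun s p => s + p.1 * p.2) 0

def distance_overlap_values_py (M : List (List Int)) (D : List (List Int)) : List (String × List Int) :=
  let buckets0 : PySem.Dict String (List Int) :=
    PySem.Dict.ofList [("0", []), ("1", []), ("2", []), ("3", [])]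
  let n : Int := M.length
  let buckets :=
    (PySem.List.pyRange 0 n 1).foldl (fun b i =>
      (PySem.List.pyRange 0 n 1).foldl (fun b j =>
        let d := PySem.List.pyGetD (PySem.List.pyGetD D i []) j 0
        if d = 0 ∨ d = 1 ∨ d = 2 ∨ d = 3 then
          b.modify (PySem.Int.toStr d) []
            (fun v => v ++ [pvRowOverlap (PySem.List.pyGetD M i []) (PySem.List.pyGetD M j [])])
        else b) b) buckets0
  -- {k: sorted(set(v)) for k, v in buckets.items()} : keys are unique, so the result dict's items are the mapped items
  buckets.items.map (fun kv => (kv.1, PySem.List.sorted (PySem.Set.ofList kv.2) (fun x => x) false))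

-- ===== PORT B =====
def distance_overlap_values_py_alt (M : List (List Int)) (D : List (List Int)) : List (String × List Int) :=
  let n : Int := M.length
  -- for d in (0,1,2,3): pairs = [(i,j) ...]; buckets[str(d)] = sorted({...}) — dict built by inserting four fresh keys
  (([(0 : Int), 1, 2, 3]).foldl (fun b d =>
    let pairs : List (Int × Int) :=
      (PySem.List.pyRange 0 n 1).flatMap (fun i =>
        (PySem.List.pyRange 0 n 1).flatMap (fun j =>
          if PySem.List.pyGetD (PySem.List.pyGetD D i []) j 0 = d then [(i, j)] else []))
    b.insert (PySem.Int.toStr d)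
      (PySem.List.sorted
        (PySem.Set.ofList (pairs.map (fun p =>
          (List.zip (PySem.List.pyGetD M p.1 []) (PySem.List.pyGetD M p.2 [])).foldl
            (fun s q => s + q.1 * q.2) 0)))
        (fun x => x) false)) PySem.Dict.empty).items

-- ===== PRECONDITION & SPEC =====
-- Pre_ excludes exactly the inputs where A raises IndexError: D (or one of its first len(M) rows) is
-- shorter than len(M), so D[i][j] is out of range for some i, j < len(M).
def Pre_distance_overlap_values_py (M : List (List Int)) (D : List (List Int)) : Prop :=
  M.length ≤ D.length ∧ ∀ r ∈ D.take M.length, M.length ≤ r.length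
instance (M : List (List Int)) (D : List (List Int)) : Decidable (Pre_distance_overlap_values_py M D) := by unfold Pre_distance_overlap_values_py; infer_instance

def pvWitness_distance_overlap_values_py : List (List Int) × List (List Int) := ([[1], [2]], [[0, 1], [1, 2]])

def Spec_distance_overlap_values_py (M : List (List Int)) (D : List (List Int)) (out : List (String × List Int)) : Prop := out = distance_overlap_values_py_alt M D
instance (M : List (List Int)) (D : List (List Int)) (out : List (String × List Int)) : Decidable (Spec_distance_overlap_values_py M D out) := by unfold Spec_distance_overlap_values_py; infer_instance

-- ===== CLAIM (what is proved, stated in full; the proofs are below) =====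
def Claim_equal_distance_overlap_values_py : Prop := ∀ (M : List (List Int)) (D : List (List Int)), Dom_distance_overlap_values_py M D → Pre_distance_overlap_values_py M D → Spec_distance_overlap_values_py M D (distance_overlap_values_py M D)


-- ===== LEMMAS AND PROOFS =====

-- proof-side abbreviations
def pvDv (D : List (List Int)) (p : Int × Int) : Int :=
  PySem.List.pyGetD (PySem.List.pyGetD D p.1 []) p.2 0

def pvOv (M : List (List Int)) (p : Int × Int) : Int :=
  pvRowOverlap (PySem.List.pyGetD M p.1 []) (PySem.List.pyGetD M p.2 [])

def pvCond (x : Int) : Bool := decide (x = 0 ∨ x = 1 ∨ x = 2 ∨ x = 3)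

def pvPairs (n : Int) : List (Int × Int) :=
  (PySem.List.pyRange 0 n 1).flatMap (fun i => (PySem.List.pyRange 0 n 1).map (fun j => (i, j)))

def pvBucket (M D : List (List Int)) (n d : Int) : List Int :=
  ((pvPairs n).filter (fun p => decide (pvDv D p = d))).map (fun p => pvOv M p)

lemma pv_foldl2 {delta : Type} (I J : List Int) (g : delta → Int → Int → delta) (b : delta) :
    I.foldl (fun b i => J.foldl (fun b j => g b i j) b) b
      = (I.flatMap (fun i => J.map (fun j => (i, j)))).foldl (fun b p => g b p.1 p.2) b := by
  induction I generalizing b with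
  | nil => rfl
  | cons a t ih => simp [List.foldl_append, List.foldl_map, ih]

lemma pv_fold_modify (M D : List (List Int)) (P : List (Int × Int)) (d : PySem.Dict String (List Int)) :
    P.foldl (fun b p =>
        if pvDv D p = 0 ∨ pvDv D p = 1 ∨ pvDv D p = 2 ∨ pvDv D p = 3 then
          b.modify (PySem.Int.toStr (pvDv D p)) [] (fun v => v ++ [pvOv M p])
        else b) d
      = ((P.filter (fun p => pvCond (pvDv D p))).map
            (fun p => (PySem.Int.toStr (pvDv D p), pvOv M p))).foldl
          (fun b q => b.modify q.1 [] (fun v => v ++ [q.2])) d := by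
  induction P generalizing d with
  | nil => rfl
  | cons a t ih =>
    by_cases h : pvDv D a = 0 ∨ pvDv D a = 1 ∨ pvDv D a = 2 ∨ pvDv D a = 3 <;>
      simp [pvCond, h, ih]

lemma pv_key_eq (x d : Int) (hd : d = 0 ∨ d = 1 ∨ d = 2 ∨ d = 3) :
    (pvCond x && (PySem.Int.toStr x == PySem.Int.toStr d)) = (x == d) := by
  by_cases hx : x = 0 ∨ x = 1 ∨ x = 2 ∨ x = 3
  · rcases hx with rfl | rfl | rfl | rfl <;> rcases hd with rfl | rfl | rfl | rfl <;> decide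
  · have hxd : x ≠ d := by rcases hd with rfl | rfl | rfl | rfl <;> tauto
    simp [pvCond, hx, hxd]

lemma pv_ite_singleton {α : Type} {q : Int → Prop} [DecidablePred q] (l : List Int) (f : Int → α) :
    (l.flatMap (fun x => if q x then [f x] else [])) = (l.filter (fun x => decide (q x))).map f := by
  induction l with
  | nil => rfl
  | cons a t ih => by_cases h : q a <;> simp [h, ih]

-- B's per-distance pair comprehension, mapped through the dot product, equals A's bucket for d
lemma pv_bucket_alt (M D : List (List Int)) (d : Int) :
    ((PySem.List.pyRange 0 (M.length : Int) 1).flatMap (fun i =>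
        (PySem.List.pyRange 0 (M.length : Int) 1).flatMap (fun j =>
          if PySem.List.pyGetD (PySem.List.pyGetD D i []) j 0 = d then [(i, j)] else []))).map
      (fun p =>
        (List.zip (PySem.List.pyGetD M p.1 []) (PySem.List.pyGetD M p.2 [])).foldl
          (fun s q => s + q.1 * q.2) 0)
      = pvBucket M D (M.length : Int) d := by
  rw [pvBucket, pvPairs, List.filter_flatMap]
  have hinner : ∀ i : Int,
      ((PySem.List.pyRange 0 (M.length : Int) 1).flatMap (fun j =>
        if PySem.List.pyGetD (PySem.List.pyGetD D i []) j 0 = d then [(i, j)] else []))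
      = (((PySem.List.pyRange 0 (M.length : Int) 1).map (fun j => (i, j))).filter
          (fun p => decide (pvDv D p = d))) := by
    intro i
    rw [pv_ite_singleton (q := fun j => PySem.List.pyGetD (PySem.List.pyGetD D i []) j 0 = d),
        List.filter_map]
    rfl
  simp only [hinner]
  rfl

def pvQlist (M D : List (List Int)) : List (String × Int) :=
  ((pvPairs (M.length : Int)).filter (fun p => pvCond (pvDv D p))).map
    (fun p => (PySem.Int.toStr (pvDv D p), pvOv M p))

def pvQ (M D : List (List Int)) : PySem.Dict String (List Int) :=
  (pvQlist M D).foldl (fun b q => b.modify q.1 [] (fun v => v ++ [q.2]))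
    (PySem.Dict.ofList [("0", []), ("1", []), ("2", []), ("3", [])])

lemma pv_keys_fold (M D : List (List Int)) : (pvQ M D).keys = ["0", "1", "2", "3"] := by
  rw [pvQ, PySem.Dict.keys_foldl_modify_key (key := fun (q : String × Int) => q.1)
      (f := fun _ q => (fun v => v ++ [q.2])) (d0 := ([] : List Int))]
  have hk : (PySem.Dict.ofList [("0", ([] : List Int)), ("1", []), ("2", []), ("3", [])]).keys
      = ["0", "1", "2", "3"] := by decide
  rw [hk, PySem.Set.update_eq_append_filter]
  have hnil : (List.filter (fun y => !(PySem.Set.contains (["0", "1", "2", "3"] : List String) y))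
      (PySem.Set.ofList ((pvQlist M D).map (fun q => q.1)))) = [] := by
    rw [List.filter_eq_nil_iff]
    intro y hy
    rw [PySem.Set.mem_ofList] at hy
    simp only [pvQlist, List.map_map, List.mem_map, Function.comp] at hy
    obtain ⟨p, hp, rfl⟩ := hy
    have hc : pvCond (pvDv D p) = true := (List.mem_filter.mp hp).2
    have hx' : pvDv D p = 0 ∨ pvDv D p = 1 ∨ pvDv D p = 2 ∨ pvDv D p = 3 := by
      simpa [pvCond] using hc
    rcases hx' with h | h | h | h <;> rw [h] <;> decide
  rw [hnil, List.append_nil]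

lemma pv_getD_bucket (M D : List (List Int)) (d : Int) (hd : d = 0 ∨ d = 1 ∨ d = 2 ∨ d = 3) :
    (pvQ M D).getD (PySem.Int.toStr d) [] = pvBucket M D (M.length : Int) d := by
  rw [pvQ, PySem.Dict.getD_foldl_modify_append]
  have h0 : (PySem.Dict.ofList [("0", ([] : List Int)), ("1", []), ("2", []), ("3", [])]).getD
      (PySem.Int.toStr d) [] = [] := by
    rcases hd with rfl | rfl | rfl | rfl <;> decide
  rw [h0, List.nil_append, pvQlist, List.filter_map, List.map_map, List.filter_filter, pvBucket]
  congr 1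
  apply List.filter_congr
  intro p _
  simpa [Bool.and_comm] using pv_key_eq (pvDv D p) d hd

lemma pv_items (M D : List (List Int)) :
    (pvQ M D).items = [("0", pvBucket M D (M.length : Int) 0), ("1", pvBucket M D (M.length : Int) 1),
      ("2", pvBucket M D (M.length : Int) 2), ("3", pvBucket M D (M.length : Int) 3)] := by
  rw [PySem.Dict.items_eq_map_keys _ (by rw [pv_keys_fold]; decide) ([] : List Int), pv_keys_fold]
  have g0 := pv_getD_bucket M D 0 (by tauto)
  have g1 := pv_getD_bucket M D 1 (by tauto)
  have g2 := pv_getD_bucket M D 2 (by tauto)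
  have g3 := pv_getD_bucket M D 3 (by tauto)
  rw [show PySem.Int.toStr 0 = "0" by decide] at g0
  rw [show PySem.Int.toStr 1 = "1" by decide] at g1
  rw [show PySem.Int.toStr 2 = "2" by decide] at g2
  rw [show PySem.Int.toStr 3 = "3" by decide] at g3
  simp [g0, g1, g2, g3]

lemma pv_A_eq (M D : List (List Int)) :
    distance_overlap_values_py M D
      = (pvQ M D).items.map
          (fun kv => (kv.1, PySem.List.sorted (PySem.Set.ofList kv.2) (fun x => x) false)) := by
  have h1 := pv_foldl2 (PySem.List.pyRange 0 (M.length : Int) 1)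
    (PySem.List.pyRange 0 (M.length : Int) 1)
    (fun (b : PySem.Dict String (List Int)) (i j : Int) =>
      if PySem.List.pyGetD (PySem.List.pyGetD D i []) j 0 = 0 ∨
         PySem.List.pyGetD (PySem.List.pyGetD D i []) j 0 = 1 ∨
         PySem.List.pyGetD (PySem.List.pyGetD D i []) j 0 = 2 ∨
         PySem.List.pyGetD (PySem.List.pyGetD D i []) j 0 = 3 then
        b.modify (PySem.Int.toStr (PySem.List.pyGetD (PySem.List.pyGetD D i []) j 0)) []
          (fun v => v ++ [pvRowOverlap (PySem.List.pyGetD M i []) (PySem.List.pyGetD M j [])])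
      else b)
    (PySem.Dict.ofList [("0", []), ("1", []), ("2", []), ("3", [])])
  have h2 := pv_fold_modify M D (pvPairs (M.length : Int))
    (PySem.Dict.ofList [("0", []), ("1", []), ("2", []), ("3", [])])
  exact congrArg
    (fun q : PySem.Dict String (List Int) =>
      q.items.map (fun kv => (kv.1, PySem.List.sorted (PySem.Set.ofList kv.2) (fun x => x) false)))
    (h1.trans h2)

lemma pv_B_eq (M D : List (List Int)) :
    distance_overlap_values_py_alt M D
      = ([(0 : Int), 1, 2, 3]).map (fun d =>
          (PySem.Int.toStr d,
           PySem.List.sorted (PySem.Set.ofList (pvBucket M D (M.length : Int) d)) (fun x => x) false)) := by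
  unfold distance_overlap_values_py_alt
  simp only [pv_bucket_alt]
  have hfresh : ∀ a ∈ ([0, 1, 2, 3] : List Int),
      (PySem.Dict.empty : PySem.Dict String (List Int)).contains (PySem.Int.toStr a) = false := by
    decide
  have hnd : (([0, 1, 2, 3] : List Int).map (fun d => PySem.Int.toStr d)).Nodup := by decide
  have h := PySem.Dict.items_foldl_insert_fresh (l := ([0, 1, 2, 3] : List Int))
    (k := fun d => PySem.Int.toStr d)
    (v := fun d => PySem.List.sorted (PySem.Set.ofList (pvBucket M D (M.length : Int) d)) (fun x => x) false)
    (d := PySem.Dict.empty) hfresh hnd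
  rw [h]
  rfl

lemma pv_main (M D : List (List Int)) :
    distance_overlap_values_py M D = distance_overlap_values_py_alt M D := by
  rw [pv_A_eq, pv_items, pv_B_eq]
  simp only [List.map]
  rw [show PySem.Int.toStr 0 = "0" by decide, show PySem.Int.toStr 1 = "1" by decide,
      show PySem.Int.toStr 2 = "2" by decide, show PySem.Int.toStr 3 = "3" by decide]

-- ===== VERDICT (by name: the statement is the Claim_ definition above) =====
theorem distance_overlap_values_py_spec : Claim_equal_distance_overlap_values_py := by
  intro M D _ _
  unfold Spec_distance_overlap_values_py
  exact pv_main M D
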